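-- pv_equiv track=rewrite | github.com/jeon-yewon/100days-of-python | project/09-blind-auction/main.py | calc_bid
-- ===== SOURCE A (Python) =====
-- def calc_bid(dict):
-- 	max_list = []
-- 	max_value = 0
-- 	for key, value in dict.items():
-- 		if value > max_value:
-- 			max_list = []
-- 			max_value = value
-- 			max_list.append([key, value])
--
-- # max_value와 같은 값을 입력했을 경우
-- 		elif max_value == value:
-- 			max_list.append([key, value])
--
-- 	winner = ""
-- 	winner_bidding = ""
-- 	for i in max_list:
-- 		winner += f"{i[0]}, "
-- 		winner_bidding = i[1]
--
-- 	return winner, winner_bidding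
-- ===== SOURCE B (Python) =====
-- def calc_bid(dict):
-- 	threshold = max(dict.values(), default=0)
-- 	threshold = max(threshold, 0)
-- 	winners = [k for k, v in dict.items() if v == threshold]
-- 	if not winners:
-- 		return "", ""
-- 	return "".join(f"{k}, " for k in winners), threshold
-- ===== Notes on version B (the rewrite author's own statement) =====
-- stated objective: simpler
-- what changed: A's single pass that maintains a winners list with reset-on-strictly-greater plus a second accumulator loop is replaced by max(values, default=0) clamped to 0, a comprehension filtering keys equal to that threshold, and ''.join.
-- outside the precondition, e.g. on calc_bid({}): A returns ('', ''), B returns ('', ''); on calc_bid({'a': -3}): A returns ('', ''), B returns ('', '')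
import Mathlib
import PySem

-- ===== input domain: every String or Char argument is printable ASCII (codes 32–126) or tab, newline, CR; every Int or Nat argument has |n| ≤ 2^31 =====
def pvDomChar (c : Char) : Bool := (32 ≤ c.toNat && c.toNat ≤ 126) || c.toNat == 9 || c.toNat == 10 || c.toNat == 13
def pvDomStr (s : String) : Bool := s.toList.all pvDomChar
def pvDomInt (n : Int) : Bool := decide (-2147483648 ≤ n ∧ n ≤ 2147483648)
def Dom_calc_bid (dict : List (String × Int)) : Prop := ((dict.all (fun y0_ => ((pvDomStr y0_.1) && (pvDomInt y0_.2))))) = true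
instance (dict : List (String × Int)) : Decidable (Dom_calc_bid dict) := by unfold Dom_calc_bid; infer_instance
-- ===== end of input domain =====

-- B replaces A's single-pass running-max-with-reset accumulator by max-then-filter-then-join (simpler).
-- Pre_ excludes inputs (empty dict or all values negative) on which A's winner_bidding is the
-- string "" rather than an int, i.e. A's return value is not of the declared String × Int type.


-- ===== PORT A =====
-- literal port of A: one pass keeping (max_list, max_value) with reset on a strictly greater
-- value, then a second pass concatenating "key, " and overwriting winner_bidding.
-- Python initialises winner_bidding to the STRING ""; here the Int 0 stands in its place —
-- that initial value survives only on inputs excluded by Pre_calc_bid.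
def calc_bid (dict : List (String × Int)) : String × Int :=
  let st := (PySem.Dict.ofList dict).items.foldl
    (fun (st : List (String × Int) × Int) kv =>
      if kv.2 > st.2 then ([(kv.1, kv.2)], kv.2)
      else if st.2 == kv.2 then (st.1 ++ [(kv.1, kv.2)], st.2)
      else st) ([], 0)
  st.1.foldl (fun (acc : String × Int) i => (acc.1 ++ (i.1 ++ ", "), i.2)) ("", 0)

-- ===== PORT B =====
-- literal port of Source B: threshold = max(values, default=0) clamped to ≥ 0, winners = keys whose
-- value equals it, result = "".join(f"{k}, ") and the threshold.  Python B returns ("", "") when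
-- there are no winners; the Int 0 stands in for that "" — only reachable outside Pre_calc_bid.
def calc_bid_alt (dict : List (String × Int)) : String × Int :=
  let items := (PySem.Dict.ofList dict).items
  let threshold := max (PySem.List.maxD (items.map (·.2)) id 0) 0
  let winners := (items.filter (fun p => p.2 == threshold)).map (·.1)
  if winners.isEmpty then ("", 0)
  else (PySem.Str.join "" (winners.map (fun k => k ++ ", ")), threshold)

-- ===== PRECONDITION & SPEC =====
-- Pre_ excludes exactly the inputs (empty dict, or every value negative) on which Python A's
-- winner_bidding stays the string "" — not a value of the declared String × Int return type.
def Pre_calc_bid (dict : List (String × Int)) : Prop :=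
  ∃ p ∈ (PySem.Dict.ofList dict).items, 0 ≤ p.2
instance (dict : List (String × Int)) : Decidable (Pre_calc_bid dict) := by
  unfold Pre_calc_bid; infer_instance
def pvWitness_calc_bid : (List (String × Int)) := [("Ann", 5)]
def Spec_calc_bid (dict : List (String × Int)) (out : String × Int) : Prop := out = calc_bid_alt dict
instance (dict : List (String × Int)) (out : String × Int) : Decidable (Spec_calc_bid dict out) := by unfold Spec_calc_bid; infer_instance

-- ===== CLAIM (what is proved, stated in full; the proofs are below) =====
def Claim_equal_calc_bid : Prop := ∀ (dict : List (String × Int)), Dom_calc_bid dict → Pre_calc_bid dict → Spec_calc_bid dict (calc_bid dict)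

-- ===== LEMMAS AND PROOFS =====

-- running max of the second components, as A's loop maintains it
def pvMax (l : List (String × Int)) (m : Int) : Int := l.foldl (fun a p => max a p.2) m

theorem pvMax_cons (p : String × Int) (l : List (String × Int)) (m : Int) :
    pvMax (p :: l) m = pvMax l (max m p.2) := rfl

theorem pvMax_eq_foldl_map (l : List (String × Int)) (m : Int) :
    pvMax l m = List.foldl max m (l.map (·.2)) := by
  simp [pvMax, List.foldl_map]

theorem le_pvMax (l : List (String × Int)) (m : Int) : m ≤ pvMax l m := by
  rw [pvMax_eq_foldl_map]; exact (PySem.List.le_foldl_max (l.map (·.2)) m).1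

theorem mem_le_pvMax (l : List (String × Int)) (m : Int) (p : String × Int) (hp : p ∈ l) :
    p.2 ≤ pvMax l m := by
  rw [pvMax_eq_foldl_map]
  exact (PySem.List.le_foldl_max (l.map (·.2)) m).2 p.2 (List.mem_map_of_mem hp)

-- A's first loop computes exactly (entries whose value equals the final running max, that max)
theorem loopA (l : List (String × Int)) (acc : List (String × Int)) (m : Int) :
    l.foldl (fun (st : List (String × Int) × Int) kv =>
        if kv.2 > st.2 then ([(kv.1, kv.2)], kv.2)
        else if st.2 == kv.2 then (st.1 ++ [(kv.1, kv.2)], st.2)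
        else st) (acc, m)
      = ((if pvMax l m = m then acc else []) ++ l.filter (fun p => p.2 == pvMax l m), pvMax l m) := by
  induction l generalizing acc m with
  | nil => simp [pvMax]
  | cons p l ih =>
    obtain ⟨pk, pv⟩ := p
    rw [pvMax_cons]
    simp only at *
    by_cases h1 : pv > m
    · have hmx : max m pv = pv := by omega
      rw [hmx]
      have hF : m < pvMax l pv := lt_of_lt_of_le h1 (le_pvMax l pv)
      have hne : ¬ pvMax l pv = m := by omega
      simp only [List.foldl_cons, if_pos h1, ih, if_neg hne, List.filter_cons]
      by_cases h2 : pv = pvMax l pv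
      · have hb : ((pk, pv).2 == pvMax l pv) = true := beq_iff_eq.mpr h2
        simp [← h2]
      · have hb : ((pk, pv).2 == pvMax l pv) = false := by simpa using h2
        have hne2 : ¬ pvMax l pv = pv := fun hc => h2 hc.symm
        simp [hb, hne2]
    · by_cases h2 : m = pv
      · have hmx : max m pv = m := by omega
        rw [hmx]
        have hb : (m == (pk, pv).2) = true := beq_iff_eq.mpr h2
        simp only [List.foldl_cons, if_neg h1, hb, ih, List.filter_cons]
        by_cases h3 : pvMax l m = m
        · have hb2 : ((pk, pv).2 == pvMax l m) = true := by
            simp only [beq_iff_eq]; omega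
          simp [h3, ← h2]
        · have hb2 : ((pk, pv).2 == pvMax l m) = false := by
            simp only [beq_eq_false_iff_ne, ne_eq]
            have := le_pvMax l m; omega
          simp [h3, hb2]
      · have hmx : max m pv = m := by omega
        rw [hmx]
        have hb : (m == (pk, pv).2) = false := by simpa using h2
        simp only [List.foldl_cons, if_neg h1, hb,
          if_neg (show ¬((false : Bool) = true) by decide), ih, List.filter_cons]
        have hb2 : ((pk, pv).2 == pvMax l m) = false := by
          simp only [beq_eq_false_iff_ne, ne_eq]
          have := le_pvMax l m; omega
        simp [hb2]

-- Python max over a nonempty int list (PySem.List.max?) is the left fold of max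
theorem max?_int_cons (x : Int) (xs : List Int) :
    PySem.List.max? (x :: xs) id = some (xs.foldl max x) := by
  simp only [PySem.List.max?, id_eq, List.foldl_cons]
  induction xs generalizing x with
  | nil => rfl
  | cons y xs ih =>
    simp only [List.foldl_cons]
    by_cases h : x < y
    · rw [if_pos h, ih, max_eq_right (le_of_lt h)]
    · rw [if_neg h, ih, max_eq_left (by omega)]

-- B's clamped max equals A's running max started at 0
theorem threshold_eq (l : List (String × Int)) :
    max (PySem.List.maxD (l.map (·.2)) id 0) 0 = pvMax l 0 := by
  cases l with
  | nil => decide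
  | cons p l =>
    rw [List.map_cons]
    simp only [PySem.List.maxD, max?_int_cons, Option.getD_some]
    rw [pvMax_cons, pvMax_eq_foldl_map]
    rw [List.foldl_assoc (op := max) (ha := ⟨fun a b c => max_assoc a b c⟩)]
    exact max_comm _ _

-- the running max is its start value or attained by some element
theorem pvMax_attained (l : List (String × Int)) (m : Int) :
    pvMax l m = m ∨ ∃ q ∈ l, q.2 = pvMax l m := by
  induction l generalizing m with
  | nil => left; rfl
  | cons p l ih =>
    rw [pvMax_cons]
    rcases ih (max m p.2) with h | ⟨q, hq, hq2⟩
    · by_cases hcmp : m ≤ p.2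
      · right; exact ⟨p, by simp, by rw [h]; omega⟩
      · left; rw [h]; omega
    · right; exact ⟨q, by simp [hq], hq2⟩

-- "".join over a cons
theorem join_empty_cons (s : String) (rest : List String) :
    PySem.Str.join "" (s :: rest) = s ++ PySem.Str.join "" rest := by
  apply String.ext
  simp only [PySem.Str.toList_join, List.map_cons, PySem.Chars.join, String.toList_append]
  generalize (List.map String.toList rest) = L
  simp only [List.intercalate]
  induction L with
  | nil => simp
  | cons y l ih => simp [List.intersperse]

-- first component of A's second loop is the join of "key, "
theorem fold_fst (wl : List (String × Int)) (w : String) (b : Int) :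
    (wl.foldl (fun (acc : String × Int) i => (acc.1 ++ (i.1 ++ ", "), i.2)) (w, b)).1
      = w ++ PySem.Str.join "" (wl.map (fun p => p.1 ++ ", ")) := by
  induction wl generalizing w b with
  | nil =>
    apply String.ext
    simp [PySem.Str.toList_join, PySem.Chars.join, List.intercalate]
  | cons p wl ih =>
    simp only [List.foldl_cons, List.map_cons, join_empty_cons, ih, String.append_assoc]

-- second component of A's second loop is the common value of the (nonempty) winner list
theorem fold_snd (wl : List (String × Int)) (M : Int) (h : ∀ p ∈ wl, p.2 = M)
    (hne : wl ≠ []) (w : String) (b : Int) :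
    (wl.foldl (fun (acc : String × Int) i => (acc.1 ++ (i.1 ++ ", "), i.2)) (w, b)).2 = M := by
  induction wl generalizing w b with
  | nil => exact absurd rfl hne
  | cons p wl ih =>
    cases wl with
    | nil => simpa using h p (by simp)
    | cons q wl' =>
      simp only [List.foldl_cons]
      exact ih (fun x hx => h x (List.mem_cons_of_mem p hx)) (by simp)
        (w ++ (p.1 ++ ", ")) p.2

-- ===== VERDICT (by name: the statement is the Claim_ definition above) =====
theorem calc_bid_spec : Claim_equal_calc_bid := by
  intro dict _ hpre
  unfold Spec_calc_bid calc_bid calc_bid_alt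
  simp only [loopA, threshold_eq, ite_self, List.nil_append]
  set l := (PySem.Dict.ofList dict).items with hl
  set F := pvMax l 0 with hF
  set wl := l.filter (fun p => p.2 == F) with hwl
  have hmem : ∀ p ∈ wl, p.2 = F := by
    intro p hp
    exact beq_iff_eq.mp ((List.mem_filter.mp hp).2)
  have hne : wl ≠ [] := by
    obtain ⟨p, hp, hp2⟩ := hpre
    rcases pvMax_attained l 0 with h0 | ⟨q, hq, hq2⟩
    · have hle : p.2 ≤ F := mem_le_pvMax l 0 p hp
      have hpF : p.2 = F := by rw [hF]; rw [hF] at hle; omega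
      intro hc
      have : p ∈ wl := List.mem_filter_of_mem hp (beq_iff_eq.mpr hpF)
      simp [hc] at this
    · intro hc
      have : q ∈ wl := List.mem_filter_of_mem hq (beq_iff_eq.mpr hq2)
      simp [hc] at this
  have hempty : ¬ (wl.map (·.1)).isEmpty = true := by
    simp [List.isEmpty_iff, hne]
  rw [if_neg hempty]
  have hmm : (wl.map (·.1)).map (fun k => k ++ ", ") = wl.map (fun p => p.1 ++ ", ") := by
    simp [List.map_map, Function.comp_def]
  have h1 := fold_fst wl "" 0
  have h2 := fold_snd wl F hmem hne "" 0
  ext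
  · rw [h1, hmm]
    simp
  · rw [h2]
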